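-- pv_equiv track=rewrite | github.com/naihongzhou1029/jastm | mmc.py | _find_best_mode
-- ===== SOURCE A (Python) =====
-- def _find_best_mode(modes, target_w, target_h, target_freq):
--     """
--     Return the (w, h, freq) that best matches the target resolution and refresh rate.
--
--     Priority:
--       1. Exact match.
--       2. Same resolution, highest refresh rate <= target.
--       3. Largest resolution below target, highest refresh rate <= target.
--       4. Absolute fallback: highest available mode.
--     """
--     mode_set = set(modes)
--
--     # 1. Exact
--     if (target_w, target_h, target_freq) in mode_set:
--         return (target_w, target_h, target_freq)
--
--     # 2. Same resolution, lower-or-equal frequency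
--     same_res = [(w, h, f) for w, h, f in modes
--                 if w == target_w and h == target_h and f <= target_freq]
--     if same_res:
--         return max(same_res, key=lambda m: m[2])
--
--     # 3. Smaller resolution, lower-or-equal frequency
--     smaller = [(w, h, f) for w, h, f in modes
--                if w * h < target_w * target_h and f <= target_freq]
--     if smaller:
--         return max(smaller, key=lambda m: (m[0] * m[1], m[2]))
--
--     # 4. Absolute fallback
--     return modes[0] if modes else None
-- ===== SOURCE B (Python) =====
-- def _find_best_mode(modes, target_w, target_h, target_freq):
--     """Single pass: track best same-resolution and best smaller-resolution
--     candidates while scanning, returning immediately on an exact match."""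
--     best_same = None
--     best_small = None
--     target_area = target_w * target_h
--     for m in modes:
--         w, h, f = m
--         if m == (target_w, target_h, target_freq):
--             return m
--         if f <= target_freq:
--             if w == target_w and h == target_h:
--                 if best_same is None or best_same[2] < f:
--                     best_same = m
--             if w * h < target_area:
--                 if best_small is None or (best_small[0] * best_small[1], best_small[2]) < (w * h, f):
--                     best_small = m
--     if best_same is not None:
--         return best_same
--     if best_small is not None:
--         return best_small
--     return modes[0] if modes else None
-- ===== Notes on version B (the rewrite author's own statement) =====
-- stated objective: alternative
-- what changed: A's set-membership check plus two separate filter-then-max passes are replaced by a single loop over modes that returns early on an exact match and maintains running best same-resolution and best smaller-resolution candidates with strict-comparison (first-wins) updates.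
import Mathlib
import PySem

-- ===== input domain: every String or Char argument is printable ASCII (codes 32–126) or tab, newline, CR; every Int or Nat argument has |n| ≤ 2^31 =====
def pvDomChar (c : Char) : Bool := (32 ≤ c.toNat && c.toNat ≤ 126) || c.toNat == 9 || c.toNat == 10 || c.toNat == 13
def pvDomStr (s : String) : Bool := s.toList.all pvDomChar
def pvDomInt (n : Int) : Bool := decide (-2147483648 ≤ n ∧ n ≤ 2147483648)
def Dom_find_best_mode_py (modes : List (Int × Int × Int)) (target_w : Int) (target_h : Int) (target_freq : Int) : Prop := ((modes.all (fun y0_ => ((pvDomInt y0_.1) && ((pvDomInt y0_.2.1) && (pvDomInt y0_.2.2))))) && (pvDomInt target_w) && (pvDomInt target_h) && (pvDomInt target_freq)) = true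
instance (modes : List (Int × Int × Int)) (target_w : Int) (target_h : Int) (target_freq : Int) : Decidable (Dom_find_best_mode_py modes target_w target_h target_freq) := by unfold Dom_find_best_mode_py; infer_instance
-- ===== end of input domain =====

-- B replaces A's set-membership test plus two filter-and-max passes by one loop that
-- maintains the best same-resolution and best smaller-resolution candidates (objective:
-- alternative single-pass decomposition; first-wins tie-breaking preserved via strict <).

-- ===== PORT A =====
def find_best_mode_py (modes : List (Int × Int × Int)) (target_w : Int) (target_h : Int) (target_freq : Int) : Option (Int × Int × Int) :=
  let mode_set : PySem.Set (Int × Int × Int) := PySem.Set.ofList modes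
  -- 1. Exact
  if PySem.Set.contains mode_set (target_w, target_h, target_freq) then
    some (target_w, target_h, target_freq)
  else
    -- 2. Same resolution, lower-or-equal frequency
    let same_res := modes.filter (fun m => m.1 == target_w && m.2.1 == target_h && decide (m.2.2 ≤ target_freq))
    -- 'if same_res: return max(same_res, key=lambda m: m[2])' — max? is none exactly when same_res == []
    match PySem.List.max? same_res (fun m => m.2.2) with
    | some b => some b
    | none =>
      -- 3. Smaller resolution, lower-or-equal frequency
      let smaller := modes.filter (fun m => decide (m.1 * m.2.1 < target_w * target_h) && decide (m.2.2 ≤ target_freq))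
      match PySem.List.max2? smaller (fun m => m.1 * m.2.1) (fun m => m.2.2) with
      | some b => some b
      | none => modes.head?   -- modes[0] if modes else None

-- ===== PORT B =====
-- per-element update of best_same (Source B: if w==target_w and h==target_h: if best_same is None or best_same[2] < f: …)
def fbmSameStep (target_w target_h target_freq : Int) (bs : Option (Int × Int × Int)) (m : Int × Int × Int) : Option (Int × Int × Int) :=
  if m.2.2 ≤ target_freq then
    if m.1 = target_w ∧ m.2.1 = target_h then
      match bs with
      | none => some m
      | some b => if b.2.2 < m.2.2 then some m else bs
    else bs
  else bs

-- per-element update of best_small (Source B: if w*h < target_area: if best_small is None or (…)<(w*h,f): …)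
def fbmSmallStep (target_w target_h target_freq : Int) (bsm : Option (Int × Int × Int)) (m : Int × Int × Int) : Option (Int × Int × Int) :=
  if m.2.2 ≤ target_freq then
    if m.1 * m.2.1 < target_w * target_h then
      match bsm with
      | none => some m
      | some b =>
        if b.1 * b.2.1 < m.1 * m.2.1 ∨ (b.1 * b.2.1 = m.1 * m.2.1 ∧ b.2.2 < m.2.2) then some m else bsm
    else bsm
  else bsm

-- the for-loop of Source B; .inl = the early 'return m' on an exact match, .inr = final accumulators
def fbmLoop (target_w target_h target_freq : Int) (bs bsm : Option (Int × Int × Int)) :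
    List (Int × Int × Int) → Sum (Int × Int × Int) (Option (Int × Int × Int) × Option (Int × Int × Int))
  | [] => .inr (bs, bsm)
  | m :: rest =>
    if m = (target_w, target_h, target_freq) then .inl m
    else fbmLoop target_w target_h target_freq
          (fbmSameStep target_w target_h target_freq bs m)
          (fbmSmallStep target_w target_h target_freq bsm m) rest

def find_best_mode_py_alt (modes : List (Int × Int × Int)) (target_w : Int) (target_h : Int) (target_freq : Int) : Option (Int × Int × Int) :=
  match fbmLoop target_w target_h target_freq none none modes with
  | .inl m => some m
  | .inr (some b, _) => some b
  | .inr (none, some b) => some b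
  | .inr (none, none) => modes.head?   -- modes[0] if modes else None

-- ===== PRECONDITION & SPEC =====
def Spec_find_best_mode_py (modes : List (Int × Int × Int)) (target_w : Int) (target_h : Int) (target_freq : Int) (out : Option (Int × Int × Int)) : Prop := out = find_best_mode_py_alt modes target_w target_h target_freq
instance (modes : List (Int × Int × Int)) (target_w : Int) (target_h : Int) (target_freq : Int) (out : Option (Int × Int × Int)) : Decidable (Spec_find_best_mode_py modes target_w target_h target_freq out) := by unfold Spec_find_best_mode_py; infer_instance

-- ===== CLAIM (what is proved, stated in full; the proofs are below) =====
def Claim_equal_find_best_mode_py : Prop := ∀ (modes : List (Int × Int × Int)) (target_w : Int) (target_h : Int) (target_freq : Int), Dom_find_best_mode_py modes target_w target_h target_freq → Spec_find_best_mode_py modes target_w target_h target_freq (find_best_mode_py modes target_w target_h target_freq)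

-- ===== LEMMAS AND PROOFS =====

-- the loop, when no exact match occurs, is a pair of foldl's; otherwise it returns the target
theorem fbmLoop_char (target_w target_h target_freq : Int) (l : List (Int × Int × Int))
    (bs bsm : Option (Int × Int × Int)) :
    fbmLoop target_w target_h target_freq bs bsm l =
      if (target_w, target_h, target_freq) ∈ l then .inl (target_w, target_h, target_freq)
      else .inr (l.foldl (fbmSameStep target_w target_h target_freq) bs,
                 l.foldl (fbmSmallStep target_w target_h target_freq) bsm) := by
  induction l generalizing bs bsm with
  | nil => simp [fbmLoop]
  | cons m rest ih =>
    by_cases hm : m = (target_w, target_h, target_freq)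
    · subst hm; simp [fbmLoop]
    · simp [fbmLoop, hm, ih, List.mem_cons, Ne.symm hm]

-- best_same accumulation = max over the same_res filter
theorem foldl_same_eq (target_w target_h target_freq : Int) (l : List (Int × Int × Int)) :
    l.foldl (fbmSameStep target_w target_h target_freq) none =
      PySem.List.max? (l.filter (fun m => m.1 == target_w && m.2.1 == target_h && decide (m.2.2 ≤ target_freq)))
        (fun m => m.2.2) := by
  unfold PySem.List.max?
  rw [List.foldl_filter]
  congr 1
  funext acc m
  cases acc with
  | none =>
    simp only [fbmSameStep, beq_iff_eq, Bool.and_eq_true, decide_eq_true_eq]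
    split_ifs <;> simp_all
  | some b =>
    simp only [fbmSameStep, beq_iff_eq, Bool.and_eq_true, decide_eq_true_eq]
    split_ifs <;> simp_all

-- best_small accumulation = lexicographic max over the smaller filter
theorem foldl_small_eq (target_w target_h target_freq : Int) (l : List (Int × Int × Int)) :
    l.foldl (fbmSmallStep target_w target_h target_freq) none =
      PySem.List.max2? (l.filter (fun m => decide (m.1 * m.2.1 < target_w * target_h) && decide (m.2.2 ≤ target_freq)))
        (fun m => m.1 * m.2.1) (fun m => m.2.2) := by
  unfold PySem.List.max2?
  rw [List.foldl_filter]
  congr 1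
  funext acc m
  cases acc with
  | none =>
    simp only [fbmSmallStep, Bool.and_eq_true, decide_eq_true_eq]
    split_ifs <;> simp_all
  | some b =>
    simp only [fbmSmallStep, Bool.and_eq_true, Bool.or_eq_true, Bool.not_eq_true', decide_eq_true_eq, decide_eq_false_iff_not]
    split_ifs <;> simp_all <;> omega

-- ===== VERDICT (by name: the statement is the Claim_ definition above) =====
theorem find_best_mode_py_spec : Claim_equal_find_best_mode_py := by
  intro modes target_w target_h target_freq _
  unfold Spec_find_best_mode_py find_best_mode_py find_best_mode_py_alt
  rw [fbmLoop_char]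
  by_cases hmem : (target_w, target_h, target_freq) ∈ modes
  · simp [hmem, PySem.Set.mem_ofList]
  · simp only [hmem, if_false]
    have hc : PySem.Set.contains (PySem.Set.ofList modes) (target_w, target_h, target_freq) = false := by
      simp [PySem.Set.mem_ofList] at hmem ⊢
      exact hmem
    rw [hc]
    simp only [Bool.false_eq_true, if_false]
    rw [foldl_same_eq, foldl_small_eq]
    cases PySem.List.max? (modes.filter (fun m => m.1 == target_w && m.2.1 == target_h && decide (m.2.2 ≤ target_freq))) (fun m => m.2.2) with
    | some b => rfl
    | none =>
      cases PySem.List.max2? (modes.filter (fun m => decide (m.1 * m.2.1 < target_w * target_h) && decide (m.2.2 ≤ target_freq))) (fun m => m.1 * m.2.1) (fun m => m.2.2) with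
      | some b => rfl
      | none => rfl
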